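-- pv_equiv track=rewrite | github.com/clevercoderjoy/python_practice_questions | check_array_rotation.py | check_array_rotation
-- ===== SOURCE A (Python) =====
-- def check_array_rotation(arr, size):
--     if size == 0:
--         return 0
--     min = 0
--     for i in range(1, size):
--         if arr[i] < arr[min]:
--             min = i
--     return min
-- ===== SOURCE B (Python) =====
-- def check_array_rotation(arr, size):
--     if size <= 1:
--         return 0
--
--     def argmin(lo, hi):
--         # tournament: first-min index of arr[lo:hi], half-interval [lo, hi)
--         if hi - lo == 1:
--             return lo
--         mid = (lo + hi) // 2
--         left = argmin(lo, mid)
--         right = argmin(mid, hi)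
--         return right if arr[right] < arr[left] else left
--
--     return argmin(0, size)
-- ===== Notes on version B (the rewrite author's own statement) =====
-- stated objective: alternative
-- what changed: Replaces A's left-to-right index-tracking scan by a recursive divide-and-conquer tournament: the first-min index of [lo,hi) is computed by splitting at the midpoint, recursing on both halves and comparing the two winners (left wins ties).
import Mathlib
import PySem

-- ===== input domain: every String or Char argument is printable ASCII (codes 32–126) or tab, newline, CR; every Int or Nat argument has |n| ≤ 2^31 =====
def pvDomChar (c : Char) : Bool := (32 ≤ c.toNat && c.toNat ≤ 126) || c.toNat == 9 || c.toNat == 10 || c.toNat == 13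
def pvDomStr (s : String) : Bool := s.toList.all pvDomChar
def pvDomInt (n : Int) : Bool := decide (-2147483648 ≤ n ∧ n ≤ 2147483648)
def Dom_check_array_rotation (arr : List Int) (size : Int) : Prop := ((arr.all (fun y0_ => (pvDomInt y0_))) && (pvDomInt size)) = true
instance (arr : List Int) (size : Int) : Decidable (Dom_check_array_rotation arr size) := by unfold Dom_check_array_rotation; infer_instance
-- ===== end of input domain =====

-- B replaces A's left-to-right scan by a recursive divide-and-conquer tournament (left half wins ties).

-- ===== PORT A =====
def check_array_rotation (arr : List Int) (size : Int) : Int :=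
  if size = 0 then 0
  else
    (PySem.List.pyRange 1 size 1).foldl
      (fun m i => if PySem.List.pyGetD arr i 0 < PySem.List.pyGetD arr m 0 then i else m) 0

-- ===== PORT B =====
-- helper argmin(lo, hi) of Source B; indices are Nat since every reachable call has 0 ≤ lo < hi.
-- 'fuel' is only a structural totality guard (hi - lo halves each call, so fuel = size suffices
-- and is never exhausted on a reachable call); Python's guard 'hi - lo == 1' is the Nat form
-- 'hi ≤ lo + 1', which coincides with it on every reachable call (lo < hi).
def argminB (arr : List Int) (fuel lo hi : Nat) : Nat :=
  match fuel with
  | 0 => lo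
  | f + 1 =>
    if hi ≤ lo + 1 then lo
    else
      let mid := (lo + hi) / 2
      let l := argminB arr f lo mid
      let r := argminB arr f mid hi
      if PySem.List.pyGetD arr (r : Int) 0 < PySem.List.pyGetD arr (l : Int) 0 then r else l

def check_array_rotation_alt (arr : List Int) (size : Int) : Int :=
  if size ≤ 1 then 0
  else (argminB arr size.toNat 0 size.toNat : Int)

-- ===== PRECONDITION & SPEC =====
-- A raises IndexError when 2 ≤ size and size > len(arr); for size ≤ 1 no element is read.
def Pre_check_array_rotation (arr : List Int) (size : Int) : Prop := 2 ≤ size → size ≤ arr.length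
instance (arr : List Int) (size : Int) : Decidable (Pre_check_array_rotation arr size) := by unfold Pre_check_array_rotation; infer_instance
def pvWitness_check_array_rotation : List Int × Int := ([3, 4, 1, 2], 4)

def Spec_check_array_rotation (arr : List Int) (size : Int) (out : Int) : Prop := out = check_array_rotation_alt arr size
instance (arr : List Int) (size : Int) (out : Int) : Decidable (Spec_check_array_rotation arr size out) := by unfold Spec_check_array_rotation; infer_instance

-- ===== CLAIM =====
def Claim_equal_check_array_rotation : Prop := ∀ (arr : List Int) (size : Int), Dom_check_array_rotation arr size → Pre_check_array_rotation arr size → Spec_check_array_rotation arr size (check_array_rotation arr size)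

-- ===== LEMMAS AND PROOFS =====

-- 'idx is the first index of the minimum of arr[lo:hi]' (elements read via pyGetD like both ports)
def FirstMin (arr : List Int) (lo hi idx : Nat) : Prop :=
  lo ≤ idx ∧ idx < hi ∧
  (∀ j : Nat, lo ≤ j → j < hi → PySem.List.pyGetD arr (idx : Int) 0 ≤ PySem.List.pyGetD arr (j : Int) 0) ∧
  (∀ j : Nat, lo ≤ j → j < idx → PySem.List.pyGetD arr (idx : Int) 0 < PySem.List.pyGetD arr (j : Int) 0)

lemma firstMin_unique (arr : List Int) (lo hi i j : Nat)
    (hi' : FirstMin arr lo hi i) (hj : FirstMin arr lo hi j) : i = j := by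
  obtain ⟨hli, hih, hmini, hstricti⟩ := hi'
  obtain ⟨hlj, hjh, hminj, hstrictj⟩ := hj
  rcases Nat.lt_trichotomy i j with h | h | h
  · have h1 := hstrictj i hli h
    have h2 := hmini j hlj hjh
    omega
  · exact h
  · have h1 := hstricti j hlj h
    have h2 := hminj i hli hih
    omega

lemma argminB_firstMin (arr : List Int) : ∀ f lo hi : Nat, hi - lo ≤ f → lo < hi →
    FirstMin arr lo hi (argminB arr f lo hi) := by
  intro f
  induction f with
  | zero => intro lo hi h1 h2; omega
  | succ f ih =>
    intro lo hi hd hlt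
    simp only [argminB]
    by_cases hbase : hi ≤ lo + 1
    · rw [if_pos hbase]
      refine ⟨le_refl _, by omega, ?_, ?_⟩
      · intro j h1 h2
        have hjlo : j = lo := by omega
        rw [hjlo]
      · intro j h1 h2; omega
    · rw [if_neg hbase]
      have hmidlo : lo < (lo + hi) / 2 := by omega
      have hmidhi : (lo + hi) / 2 < hi := by omega
      obtain ⟨hl1, hl2, hlmin, hlstrict⟩ := ih lo ((lo + hi) / 2) (by omega) hmidlo
      obtain ⟨hr1, hr2, hrmin, hrstrict⟩ := ih ((lo + hi) / 2) hi (by omega) hmidhi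
      set mid := (lo + hi) / 2
      set l := argminB arr f lo mid
      set r := argminB arr f mid hi
      by_cases hcmp : PySem.List.pyGetD arr (r : Int) 0 < PySem.List.pyGetD arr (l : Int) 0
      · rw [if_pos hcmp]
        refine ⟨by omega, hr2, ?_, ?_⟩
        · intro j h1 h2
          by_cases hj : j < mid
          · exact le_of_lt (lt_of_lt_of_le hcmp (hlmin j h1 hj))
          · exact hrmin j (by omega) h2
        · intro j h1 h2
          by_cases hj : j < mid
          · exact lt_of_lt_of_le hcmp (hlmin j h1 hj)
          · exact hrstrict j (by omega) h2
      · rw [if_neg hcmp]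
        push Not at hcmp
        refine ⟨hl1, by omega, ?_, ?_⟩
        · intro j h1 h2
          by_cases hj : j < mid
          · exact hlmin j h1 hj
          · exact le_trans hcmp (hrmin j (by omega) h2)
        · intro j h1 h2
          exact hlstrict j h1 h2

-- A's loop over range(1, n) computes the first-min index of [0, n)
lemma loopA_firstMin (arr : List Int) : ∀ n : Nat, 1 ≤ n →
    ∃ m : Nat, (PySem.List.pyRange 1 (n : Int) 1).foldl
      (fun m i => if PySem.List.pyGetD arr i 0 < PySem.List.pyGetD arr m 0 then i else m) 0 = (m : Int)
      ∧ FirstMin arr 0 n m := by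
  intro n
  induction n with
  | zero => omega
  | succ k ih =>
    intro _
    by_cases hk : k = 0
    · subst hk
      rw [show ((1 : Nat) : Int) = 1 by norm_num, PySem.List.pyRange_one_eq_nil (by norm_num)]
      refine ⟨0, rfl, by norm_num, by omega, ?_, by omega⟩
      intro j h1 h2
      have hj0 : j = 0 := by omega
      rw [hj0]
    · obtain ⟨m, hm, hm0, hmk, hmin, hstrict⟩ := ih (by omega)
      have hsplit : PySem.List.pyRange 1 ((k + 1 : Nat) : Int) 1
          = PySem.List.pyRange 1 (k : Int) 1 ++ [(k : Int)] := by
        push_cast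
        exact PySem.List.pyRange_one_succ_right (by exact_mod_cast Nat.one_le_iff_ne_zero.mpr hk)
      rw [hsplit, List.foldl_append, hm]
      simp only [List.foldl_cons, List.foldl_nil]
      by_cases hcmp : PySem.List.pyGetD arr (k : Int) 0 < PySem.List.pyGetD arr (m : Int) 0
      · rw [if_pos hcmp]
        refine ⟨k, rfl, by omega, by omega, ?_, ?_⟩
        · intro j h1 h2
          by_cases hj : j < k
          · exact le_of_lt (lt_of_lt_of_le hcmp (hmin j h1 hj))
          · have hjk : j = k := by omega
            rw [hjk]
        · intro j h1 h2
          exact lt_of_lt_of_le hcmp (hmin j h1 h2)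
      · rw [if_neg hcmp]
        push Not at hcmp
        refine ⟨m, rfl, by omega, by omega, ?_, ?_⟩
        · intro j h1 h2
          by_cases hj : j < k
          · exact hmin j h1 hj
          · have hjk : j = k := by omega
            rw [hjk]; exact hcmp
        · intro j h1 h2
          exact hstrict j h1 h2

-- ===== VERDICT =====
theorem check_array_rotation_spec : Claim_equal_check_array_rotation := by
  intro arr size _hdom _hpre
  unfold Spec_check_array_rotation check_array_rotation check_array_rotation_alt
  by_cases hle : size ≤ 1
  · rw [if_pos hle]
    by_cases h0 : size = 0
    · rw [if_pos h0]
    · rw [if_neg h0, PySem.List.pyRange_one_eq_nil hle]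
      rfl
  · rw [if_neg hle, if_neg (by omega : ¬ size = 0)]
    have hsz : size = ((size.toNat : Nat) : Int) := by omega
    have hn1 : 1 ≤ size.toNat := by omega
    obtain ⟨m, hm, hfm⟩ := loopA_firstMin arr size.toNat hn1
    have hfb := argminB_firstMin arr size.toNat 0 size.toNat (by omega) (by omega)
    rw [hsz, hm, firstMin_unique arr 0 size.toNat m (argminB arr size.toNat 0 size.toNat) hfm hfb]
    rw [Int.toNat_natCast]
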